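-- pv_equiv track=rewrite | github.com/arunchaganty/kbp-online | src/kbpo/evaluation.py | _merge_Y0
-- ===== SOURCE A (Python) =====
-- def _merge_Y0(Y0):
--     assert len(Y0) > 0
--     assert len(Y0[0]) > 0
--
--     ret = []
--
--     m = len(Y0)
--     n = len(Y0[0])
--     for i in range(n):
--         x = Y0[0][i][0]
--         # handles the null case by defaulting to 0; this is ok because
--         # gx = 0 only if NONE of the systems got this element.
--         gx = max(Y0[j][i][1] or 0 for j in range(m))
--         ret.append((x, gx))
--     return ret
-- ===== SOURCE B (Python) =====
-- def _merge_Y0(Y0):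
--     assert len(Y0) > 0
--     assert len(Y0[0]) > 0
--     xs = [p[0] for p in Y0[0]]
--     gx = [p[1] or 0 for p in Y0[0]]
--     for row in Y0[1:]:
--         gx = [max(g, q[1] or 0) for g, q in zip(gx, row)]
--     return list(zip(xs, gx))
-- ===== Notes on version B (the rewrite author's own statement) =====
-- stated objective: alternative
-- what changed: Replaces A's column-major nested loop (an independent max-generator scan over all rows for each column) by a single row-major pass that maintains an array of running column maxima, zipped with the first row's x values at the end.
import Mathlib
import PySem

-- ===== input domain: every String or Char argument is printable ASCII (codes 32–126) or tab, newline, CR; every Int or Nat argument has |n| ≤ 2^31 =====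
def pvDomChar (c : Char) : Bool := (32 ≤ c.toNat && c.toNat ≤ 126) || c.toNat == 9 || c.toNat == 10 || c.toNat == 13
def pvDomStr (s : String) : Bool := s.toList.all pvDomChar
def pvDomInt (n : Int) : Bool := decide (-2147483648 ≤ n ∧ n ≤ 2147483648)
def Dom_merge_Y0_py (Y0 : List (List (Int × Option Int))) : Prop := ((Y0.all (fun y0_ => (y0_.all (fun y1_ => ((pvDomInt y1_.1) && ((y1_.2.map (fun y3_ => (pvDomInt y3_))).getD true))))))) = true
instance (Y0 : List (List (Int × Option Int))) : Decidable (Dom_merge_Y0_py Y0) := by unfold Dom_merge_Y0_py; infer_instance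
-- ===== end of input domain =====

-- B replaces A's column-major inner max-scans by a single row-major pass maintaining running column maxima (alternative decomposition, same cost).


-- ===== PORT A =====
-- `Y0[j][i][1] or 0` : a falsy value (None or 0) becomes 0; Some 0 and none both give 0, so this is `.getD 0` exactly.
def merge_Y0_py (Y0 : List (List (Int × Option Int))) : List (Int × Int) :=
  let m := Y0.length
  let n := (Y0.headD []).length
  (PySem.List.pyRange 0 (n : Int) 1).foldl (fun ret i =>
    let x := (PySem.List.pyGetD (Y0.headD []) i (0, none)).1
    -- max(generator): first value, then fold max over the rest (Y0 nonempty under Pre_)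
    let vals := (PySem.List.pyRange 0 (m : Int) 1).map (fun j =>
      ((PySem.List.pyGetD (PySem.List.pyGetD Y0 j []) i (0, none)).2).getD 0)
    let gx := match vals with
      | [] => 0
      | v :: vs => vs.foldl max v
    ret ++ [(x, gx)]) []

-- ===== PORT B =====
-- one row-major update of the running column maxima
def pvStep (gx : List Int) (row : List (Int × Option Int)) : List Int :=
  (gx.zip row).map (fun p => max p.1 (p.2.2.getD 0))

def merge_Y0_py_alt (Y0 : List (List (Int × Option Int))) : List (Int × Int) :=
  match Y0 with
  | [] => []
  | first :: rest =>
    let xs := first.map (fun p => p.1)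
    let gx := rest.foldl pvStep (first.map (fun p => p.2.getD 0))
    xs.zip gx

-- ===== PRECONDITION & SPEC =====
-- Pre_ excludes exactly the inputs where the Python A raises: empty Y0 or empty first row
-- (failed asserts) and any later row shorter than the first (IndexError in the max generator).
def Pre_merge_Y0_py (Y0 : List (List (Int × Option Int))) : Prop :=
  Y0 ≠ [] ∧ (Y0.headD []) ≠ [] ∧ ∀ row ∈ Y0, (Y0.headD []).length ≤ row.length
instance (Y0 : List (List (Int × Option Int))) : Decidable (Pre_merge_Y0_py Y0) := by
  unfold Pre_merge_Y0_py; infer_instance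

def pvWitness_merge_Y0_py : (List (List (Int × Option Int))) :=
  [[(1, some 2), (3, none)], [(5, some (-4)), (6, some 7)]]

def Spec_merge_Y0_py (Y0 : List (List (Int × Option Int))) (out : List (Int × Int)) : Prop := out = merge_Y0_py_alt Y0
instance (Y0 : List (List (Int × Option Int))) (out : List (Int × Int)) : Decidable (Spec_merge_Y0_py Y0 out) := by unfold Spec_merge_Y0_py; infer_instance

-- ===== CLAIM (what is proved, stated in full; the proofs are below) =====
def Claim_equal_merge_Y0_py : Prop := ∀ (Y0 : List (List (Int × Option Int))), Dom_merge_Y0_py Y0 → Pre_merge_Y0_py Y0 → Spec_merge_Y0_py Y0 (merge_Y0_py Y0)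

-- ===== LEMMAS AND PROOFS =====

theorem length_pvStep (gx : List Int) (row : List (Int × Option Int)) :
    (pvStep gx row).length = min gx.length row.length := by
  simp [pvStep]

theorem length_foldl_pvStep (rest : List (List (Int × Option Int))) :
    ∀ gx : List Int, (∀ row ∈ rest, gx.length ≤ row.length) →
      (rest.foldl pvStep gx).length = gx.length := by
  induction rest with
  | nil => intro gx _; rfl
  | cons r rs ih =>
    intro gx h
    have h1 : (pvStep gx r).length = gx.length := by
      rw [length_pvStep]; exact Nat.min_eq_left (h r (by simp))
    simp only [List.foldl_cons]
    rw [ih (pvStep gx r) (by intro row hrow; rw [h1]; exact h row (by simp [hrow]))]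
    exact h1

theorem getD_foldl_pvStep (rest : List (List (Int × Option Int))) (k : Nat) :
    ∀ gx : List Int, (∀ row ∈ rest, gx.length ≤ row.length) → k < gx.length →
      (rest.foldl pvStep gx).getD k 0 =
        rest.foldl (fun a row => max a ((row.getD k (0, none)).2.getD 0)) (gx.getD k 0) := by
  induction rest with
  | nil => intro gx _ _; rfl
  | cons r rs ih =>
    intro gx h hk
    have hr : gx.length ≤ r.length := h r (by simp)
    have h1 : (pvStep gx r).length = gx.length := by
      rw [length_pvStep]; exact Nat.min_eq_left hr
    simp only [List.foldl_cons]
    rw [ih (pvStep gx r) (by intro row hrow; rw [h1]; exact h row (by simp [hrow])) (by omega)]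
    congr 1
    have hkr : k < r.length := lt_of_lt_of_le hk hr
    simp [pvStep, hk, hkr]

-- indexed access over range collapses to a direct map over the list
theorem map_range_getD {α β : Type} (xs : List α) (d : α) (g : α → β) :
    (List.range xs.length).map (fun j => g (xs.getD j d)) = xs.map g := by
  apply List.ext_getElem
  · simp
  · intro k h1 h2
    simp only [List.getElem_map, List.getElem_range, List.getD]
    rw [List.getElem?_eq_getElem (by simpa using h2)]
    rfl

theorem merge_Y0_py_spec : Claim_equal_merge_Y0_py := by
  intro Y0 _ hpre
  obtain ⟨hne, hfne, hlen⟩ := hpre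
  obtain ⟨first, rest, rfl⟩ : ∃ f r, Y0 = f :: r := by
    cases Y0 with
    | nil => exact absurd rfl hne
    | cons f r => exact ⟨f, r, rfl⟩
  simp only [List.headD_cons] at hfne hlen
  unfold Spec_merge_Y0_py merge_Y0_py merge_Y0_py_alt
  simp only [List.headD_cons]
  rw [PySem.List.foldl_append_singleton_eq_map]
  simp only [PySem.List.pyRange_zero_natCast, List.map_map, List.nil_append]
  -- both sides are length-(first.length) lists; compare entrywise
  have hrest : ∀ row ∈ rest, (first.map (fun p => p.2.getD 0)).length ≤ row.length := by
    intro row hrow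
    simpa using hlen row (by simp [hrow])
  have hgxlen : (rest.foldl pvStep (first.map (fun p => p.2.getD 0))).length = first.length := by
    rw [length_foldl_pvStep rest _ hrest]; simp
  apply List.ext_getElem
  · simp [hgxlen]
  · intro k h1 h2
    simp only [List.length_map, List.length_range] at h1
    simp only [Function.comp, List.getElem_map, List.getElem_range, List.getElem_zip,
      PySem.List.pyGetD_natCast]
    simp only [Function.comp_def, PySem.List.pyGetD_natCast]
    -- the column-max generator of A is a fold over the rows
    rw [map_range_getD (first :: rest) [] (fun row => ((row.getD k (0, none)).2).getD 0)]
    simp only [List.map_cons]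
    rw [List.foldl_map]
    simp only [Prod.mk.injEq]
    constructor
    · simp [h1]
    · rw [show (rest.foldl pvStep (first.map fun p => p.2.getD 0))[k] =
            (rest.foldl pvStep (first.map fun p => p.2.getD 0)).getD k 0 by
          rw [List.getD_eq_getElem _ _ (by omega)]]
      rw [getD_foldl_pvStep rest k _ hrest (by simpa using h1)]
      congr 1
      simp [h1]
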